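-- pv_equiv track=rewrite | github.com/Fondamenti18/fondamenti-di-programmazione | students/1721561/homework04/program01.py | get_ancestors_grade_tree
-- ===== SOURCE A (Python) =====
-- def get_ancestors_grade_tree(dictionary,curr_level,max_level,y,dict_levels,grade_dict,ancestors_grade_tree):
--
-- 	if curr_level<max_level:
-- 		for node_level in dict_levels[str(curr_level)]:
-- 			if grade_dict[node_level] == y:
-- 				for child in dictionary[node_level]:
-- 					ancestors_grade_tree[child]= ancestors_grade_tree[node_level]+1
-- 			else:
-- 				for child in dictionary[node_level]:
-- 					ancestors_grade_tree[child]= ancestors_grade_tree[node_level]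
-- 		get_ancestors_grade_tree(dictionary,int(curr_level)+1,max_level,y,dict_levels,grade_dict,ancestors_grade_tree)
--
-- 	return ancestors_grade_tree
-- ===== SOURCE B (Python) =====
-- def get_ancestors_grade_tree(dictionary, curr_level, max_level, y, dict_levels, grade_dict, ancestors_grade_tree):
--     # Two staged passes instead of tail recursion: first flatten all levels into
--     # one ordered work list of (node, 0/1 bump) pairs, then apply the writes in
--     # a single flat loop (mutating ancestors_grade_tree in place, like A).
--     work = [(node, 1 if grade_dict[node] == y else 0)
--             for level in range(curr_level, max_level)
--             for node in dict_levels[str(level)]]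
--     for node, bump in work:
--         for child in dictionary[node]:
--             ancestors_grade_tree[child] = ancestors_grade_tree[node] + bump
--     return ancestors_grade_tree
-- ===== Notes on version B (the rewrite author's own statement) =====
-- stated objective: simpler
-- what changed: The tail recursion over levels with duplicated if/else child loops is replaced by two staged passes: a flat comprehension that builds one ordered (node, 0/1-bump) work list across all levels, then a single write loop applying it.
import Mathlib
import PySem

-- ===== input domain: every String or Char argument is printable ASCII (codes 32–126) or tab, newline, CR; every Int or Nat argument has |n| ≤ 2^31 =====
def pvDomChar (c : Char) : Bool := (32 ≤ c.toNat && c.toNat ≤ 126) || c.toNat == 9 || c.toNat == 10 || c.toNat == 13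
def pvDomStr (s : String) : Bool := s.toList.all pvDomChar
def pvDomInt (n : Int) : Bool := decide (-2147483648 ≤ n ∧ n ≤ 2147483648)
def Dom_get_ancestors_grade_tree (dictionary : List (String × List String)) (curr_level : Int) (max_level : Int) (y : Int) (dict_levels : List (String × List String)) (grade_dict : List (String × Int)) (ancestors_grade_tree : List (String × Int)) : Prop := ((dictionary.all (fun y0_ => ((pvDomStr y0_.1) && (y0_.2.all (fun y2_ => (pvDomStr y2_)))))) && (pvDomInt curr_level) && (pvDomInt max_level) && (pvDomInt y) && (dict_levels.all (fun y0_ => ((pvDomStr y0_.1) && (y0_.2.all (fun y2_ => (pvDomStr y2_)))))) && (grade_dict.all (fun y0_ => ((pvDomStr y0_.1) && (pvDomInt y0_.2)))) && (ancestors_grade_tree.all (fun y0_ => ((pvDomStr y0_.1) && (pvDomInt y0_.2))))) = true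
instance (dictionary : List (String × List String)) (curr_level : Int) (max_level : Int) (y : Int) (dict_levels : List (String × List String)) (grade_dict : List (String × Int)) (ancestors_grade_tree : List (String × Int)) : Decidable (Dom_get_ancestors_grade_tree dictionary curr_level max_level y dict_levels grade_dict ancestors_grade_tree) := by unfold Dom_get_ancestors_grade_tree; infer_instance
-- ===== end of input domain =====

-- B replaces A's tail recursion over levels (with its duplicated if/else child loops) by two
-- staged passes: build one flat ordered work list of (node, 0/1 bump) pairs across all levels,
-- then apply the writes in a single loop (objective: simpler). A mutates ancestors_grade_tree
-- in place and B does the same; the claim is about the returned value.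

-- ===== PORT A =====
def get_ancestors_grade_tree (dictionary : List (String × List String)) (curr_level : Int) (max_level : Int) (y : Int) (dict_levels : List (String × List String)) (grade_dict : List (String × Int)) (ancestors_grade_tree : List (String × Int)) : List (String × Int) :=
  if _h : curr_level < max_level then
    let tree : PySem.Dict String Int :=
      (PySem.Dict.getD ⟨dict_levels⟩ (PySem.Int.toStr curr_level) []).foldl
        (fun (t : PySem.Dict String Int) node_level =>
          if PySem.Dict.getD (⟨grade_dict⟩ : PySem.Dict String Int) node_level 0 == y then
            (PySem.Dict.getD (⟨dictionary⟩ : PySem.Dict String (List String)) node_level []).foldl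
              (fun t child => t.insert child (t.getD node_level 0 + 1)) t
          else
            (PySem.Dict.getD (⟨dictionary⟩ : PySem.Dict String (List String)) node_level []).foldl
              (fun t child => t.insert child (t.getD node_level 0)) t)
        ⟨ancestors_grade_tree⟩
    get_ancestors_grade_tree dictionary (curr_level + 1) max_level y dict_levels grade_dict tree.items
  else
    ancestors_grade_tree
termination_by (max_level - curr_level).toNat
decreasing_by omega

-- ===== PORT B =====
def get_ancestors_grade_tree_alt (dictionary : List (String × List String)) (curr_level : Int) (max_level : Int) (y : Int) (dict_levels : List (String × List String)) (grade_dict : List (String × Int)) (ancestors_grade_tree : List (String × Int)) : List (String × Int) :=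
  let work : List (String × Int) :=
    (PySem.List.pyRange curr_level max_level 1).flatMap (fun level =>
      (PySem.Dict.getD (⟨dict_levels⟩ : PySem.Dict String (List String)) (PySem.Int.toStr level) []).map
        (fun node => (node, if PySem.Dict.getD (⟨grade_dict⟩ : PySem.Dict String Int) node 0 == y then (1 : Int) else 0)))
  (work.foldl
    (fun (tree : PySem.Dict String Int) nb =>
      (PySem.Dict.getD (⟨dictionary⟩ : PySem.Dict String (List String)) nb.1 []).foldl
        (fun t child => t.insert child (t.getD nb.1 0 + nb.2)) tree)
    ⟨ancestors_grade_tree⟩).items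

-- ===== PRECONDITION & SPEC =====
-- Key-availability check (a condition on the inputs, computing no grade counts): walking the
-- listed levels in order, every node listed at a level must be a key of grade_dict and of
-- dictionary, and — when its child list is non-empty — a key already available, where the
-- available keys are the initial ancestors_grade_tree keys plus the children of nodes listed
-- earlier; this is exactly Python A's no-KeyError condition.
def pvNodesOk (dictionary : List (String × List String)) (grade_dict : List (String × Int)) : List String → List String → Option (List String)
  | [], avail => some avail
  | node :: rest, avail =>
    match PySem.Dict.get? (⟨grade_dict⟩ : PySem.Dict String Int) node,
          PySem.Dict.get? (⟨dictionary⟩ : PySem.Dict String (List String)) node with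
    | some _, some children =>
      if children.isEmpty || avail.contains node then
        pvNodesOk dictionary grade_dict rest (avail ++ children)
      else none
    | _, _ => none

def pvLevelsOk (dictionary : List (String × List String)) (dict_levels : List (String × List String)) (grade_dict : List (String × Int)) : List Int → List String → Bool
  | [], _ => true
  | l :: rest, avail =>
    match PySem.Dict.get? (⟨dict_levels⟩ : PySem.Dict String (List String)) (PySem.Int.toStr l) with
    | none => false
    | some nodes =>
      match pvNodesOk dictionary grade_dict nodes avail with
      | none => false
      | some avail' => pvLevelsOk dictionary dict_levels grade_dict rest avail'

-- Pre_ holds exactly when Python A returns (no KeyError on dict_levels[str(level)],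
-- grade_dict[node], dictionary[node] or ancestors_grade_tree[node]); the leading range-length
-- bound is implied by the per-level key lookups (the keys str(level) are pairwise distinct)
-- and only keeps the check from materialising a huge range, so it excludes no returning input.
def pvPreCheck (dictionary : List (String × List String)) (curr_level : Int) (max_level : Int) (dict_levels : List (String × List String)) (grade_dict : List (String × Int)) (ancestors_grade_tree : List (String × Int)) : Bool :=
  if max_level - curr_level ≤ (dict_levels.length : Int) then
    pvLevelsOk dictionary dict_levels grade_dict
      (PySem.List.pyRange curr_level max_level 1) (ancestors_grade_tree.map Prod.fst)
  else false

def Pre_get_ancestors_grade_tree (dictionary : List (String × List String)) (curr_level : Int) (max_level : Int) (y : Int) (dict_levels : List (String × List String)) (grade_dict : List (String × Int)) (ancestors_grade_tree : List (String × Int)) : Prop :=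
  pvPreCheck dictionary curr_level max_level dict_levels grade_dict ancestors_grade_tree = true
instance (dictionary : List (String × List String)) (curr_level : Int) (max_level : Int) (y : Int) (dict_levels : List (String × List String)) (grade_dict : List (String × Int)) (ancestors_grade_tree : List (String × Int)) : Decidable (Pre_get_ancestors_grade_tree dictionary curr_level max_level y dict_levels grade_dict ancestors_grade_tree) := by unfold Pre_get_ancestors_grade_tree; infer_instance

def pvWitness_get_ancestors_grade_tree : (List (String × List String)) × Int × Int × Int × (List (String × List String)) × (List (String × Int)) × (List (String × Int)) :=
  ([("a", ["b"])], 0, 1, 5, [("0", ["a"])], [("a", 5)], [("a", 0), ("b", 0)])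

def Spec_get_ancestors_grade_tree (dictionary : List (String × List String)) (curr_level : Int) (max_level : Int) (y : Int) (dict_levels : List (String × List String)) (grade_dict : List (String × Int)) (ancestors_grade_tree : List (String × Int)) (out : List (String × Int)) : Prop := out = get_ancestors_grade_tree_alt dictionary curr_level max_level y dict_levels grade_dict ancestors_grade_tree
instance (dictionary : List (String × List String)) (curr_level : Int) (max_level : Int) (y : Int) (dict_levels : List (String × List String)) (grade_dict : List (String × Int)) (ancestors_grade_tree : List (String × Int)) (out : List (String × Int)) : Decidable (Spec_get_ancestors_grade_tree dictionary curr_level max_level y dict_levels grade_dict ancestors_grade_tree out) := by unfold Spec_get_ancestors_grade_tree; infer_instance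

-- ===== CLAIM (what is proved, stated in full; the proofs are below) =====
def Claim_equal_get_ancestors_grade_tree : Prop := ∀ (dictionary : List (String × List String)) (curr_level : Int) (max_level : Int) (y : Int) (dict_levels : List (String × List String)) (grade_dict : List (String × Int)) (ancestors_grade_tree : List (String × Int)), Dom_get_ancestors_grade_tree dictionary curr_level max_level y dict_levels grade_dict ancestors_grade_tree → Pre_get_ancestors_grade_tree dictionary curr_level max_level y dict_levels grade_dict ancestors_grade_tree → Spec_get_ancestors_grade_tree dictionary curr_level max_level y dict_levels grade_dict ancestors_grade_tree (get_ancestors_grade_tree dictionary curr_level max_level y dict_levels grade_dict ancestors_grade_tree)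

-- ===== LEMMAS AND PROOFS =====

-- One level of A (the two-branch node fold) equals one work-list segment of B.
theorem level_eq (dictionary : List (String × List String)) (y : Int)
    (grade_dict : List (String × Int)) (nodes : List String)
    (tree : PySem.Dict String Int) :
    nodes.foldl
      (fun (t : PySem.Dict String Int) node_level =>
        if PySem.Dict.getD (⟨grade_dict⟩ : PySem.Dict String Int) node_level 0 == y then
          (PySem.Dict.getD (⟨dictionary⟩ : PySem.Dict String (List String)) node_level []).foldl
            (fun t child => t.insert child (t.getD node_level 0 + 1)) t
        else
          (PySem.Dict.getD (⟨dictionary⟩ : PySem.Dict String (List String)) node_level []).foldl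
            (fun t child => t.insert child (t.getD node_level 0)) t) tree
      = (nodes.map (fun node => (node,
          if PySem.Dict.getD (⟨grade_dict⟩ : PySem.Dict String Int) node 0 == y then (1 : Int) else 0))).foldl
          (fun (tree : PySem.Dict String Int) (nb : String × Int) =>
            (PySem.Dict.getD (⟨dictionary⟩ : PySem.Dict String (List String)) nb.1 []).foldl
              (fun t child => t.insert child (t.getD nb.1 0 + nb.2)) tree) tree := by
  rw [List.foldl_map]
  induction nodes generalizing tree with
  | nil => rfl
  | cons node rest ih =>
    simp only [List.foldl_cons]
    rw [ih]
    by_cases h : PySem.Dict.getD (⟨grade_dict⟩ : PySem.Dict String Int) node 0 == y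
    · simp [h]
    · simp [h]

-- A's recursion over levels equals B's fold over the flattened work list.
theorem levels_eq (dictionary : List (String × List String)) (y : Int)
    (dict_levels : List (String × List String)) (grade_dict : List (String × Int))
    (max_level : Int) :
    ∀ (n : Nat) (curr_level : Int), (max_level - curr_level).toNat = n →
    ∀ (tree : List (String × Int)),
    get_ancestors_grade_tree dictionary curr_level max_level y dict_levels grade_dict tree
      = get_ancestors_grade_tree_alt dictionary curr_level max_level y dict_levels grade_dict tree := by
  intro n
  induction n with
  | zero =>
    intro curr_level hn tree
    have hge : max_level ≤ curr_level := by omega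
    rw [get_ancestors_grade_tree, dif_neg (by omega : ¬ curr_level < max_level)]
    simp only [get_ancestors_grade_tree_alt,
      PySem.List.pyRange_one_eq_nil hge, List.flatMap_nil, List.foldl_nil]
  | succ k ih =>
    intro curr_level hn tree
    have hlt : curr_level < max_level := by
      omega
    rw [get_ancestors_grade_tree, dif_pos hlt]
    rw [ih (curr_level + 1) (by omega)]
    simp only [get_ancestors_grade_tree_alt,
      PySem.List.pyRange_one_cons hlt, List.flatMap_cons, List.foldl_append]
    rw [level_eq]

-- ===== VERDICT (by name: the statement is the Claim_ definition above) =====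
theorem get_ancestors_grade_tree_spec : Claim_equal_get_ancestors_grade_tree := by
  intro dictionary curr_level max_level y dict_levels grade_dict ancestors_grade_tree _hdom _hpre
  unfold Spec_get_ancestors_grade_tree
  exact levels_eq dictionary y dict_levels grade_dict max_level
    (max_level - curr_level).toNat curr_level rfl ancestors_grade_tree
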